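-- pv_equiv track=rewrite | github.com/aosabook/500lines | template-engine/cogutil.py | selected_lines
-- ===== SOURCE A (Python) =====
-- def selected_lines(lines, first=None, after=None, numlines=None, numblanks=None):
--     ready = after is None
--     including = False
--     for line in lines:
--         if not ready:
--             if after in line:
--                 ready = True
--         if ready and first is not None and first in line:
--             including = True
--         if including:
--             if numblanks is not None and not line.strip():
--                 numblanks -= 1
--                 if not numblanks:
--                     break
--             yield line
--             if numlines is not None:
--                 numlines -= 1
--                 if not numlines:
--                     break
-- ===== SOURCE B (Python) =====
-- def selected_lines(lines, first=None, after=None, numlines=None, numblanks=None):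
--     # B: skip phases to find the start, then compute a cut index over the
--     # remaining suffix and yield that slice, instead of A's flag state machine.
--     if first is None:
--         return
--     seq = list(lines)
--     i = 0
--     if after is not None:
--         while i < len(seq) and after not in seq[i]:
--             i += 1
--     while i < len(seq) and first not in seq[i]:
--         i += 1
--     seq = seq[i:]
--     nl, nb = numlines, numblanks
--     cut = len(seq)
--     for k, line in enumerate(seq):
--         blank = not line.strip()
--         if blank and nb is not None:
--             nb -= 1
--             if nb == 0:
--                 cut = k
--                 break
--         if nl is not None:
--             nl -= 1
--             if nl == 0:
--                 cut = k + 1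
--                 break
--     yield from seq[:cut]
-- ===== Notes on version B (the rewrite author's own statement) =====
-- stated objective: alternative
-- what changed: B replaces A's ready/including boolean state machine and incremental yielding by two explicit skip phases to locate the start, then a counter scan that only computes a cut index, returning the slice seq[:cut] of the remaining suffix.
import Mathlib
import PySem

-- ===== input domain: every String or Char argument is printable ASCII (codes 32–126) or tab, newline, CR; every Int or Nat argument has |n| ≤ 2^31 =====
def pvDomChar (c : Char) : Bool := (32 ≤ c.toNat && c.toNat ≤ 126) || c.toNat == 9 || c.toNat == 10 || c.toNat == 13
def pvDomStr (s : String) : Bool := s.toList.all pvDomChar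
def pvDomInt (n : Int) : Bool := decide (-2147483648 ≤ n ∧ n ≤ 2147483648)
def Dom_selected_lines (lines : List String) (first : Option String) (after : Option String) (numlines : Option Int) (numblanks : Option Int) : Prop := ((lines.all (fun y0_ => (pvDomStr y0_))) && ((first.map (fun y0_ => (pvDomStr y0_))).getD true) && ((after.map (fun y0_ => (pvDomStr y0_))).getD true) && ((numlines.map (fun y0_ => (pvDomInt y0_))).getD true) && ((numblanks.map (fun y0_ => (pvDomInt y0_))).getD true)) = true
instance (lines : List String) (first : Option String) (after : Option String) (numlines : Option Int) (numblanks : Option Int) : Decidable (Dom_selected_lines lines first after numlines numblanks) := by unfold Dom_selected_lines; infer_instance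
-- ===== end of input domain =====

-- B replaces A's ready/including flag machine and incremental yielding by skip phases
-- plus a counter scan that only computes a cut index, returning a slice (alternative decomposition, same cost).

-- ===== PORT A =====
-- A's for-loop over lines with mutable state (ready, including, numlines, numblanks).
-- `after.getD ""` in the ready-update is only evaluated when ready = false, where Python
-- guarantees after is not None (ready starts as `after is None` and is monotone), so it is exact.
def selLoopA (first after : Option String) : List String → Bool → Bool → Option Int → Option Int → List String
  | [], _, _, _, _ => []
  | line :: rest, ready, including, numlines, numblanks =>
    let ready := if !ready && PySem.Str.isIn (after.getD "") line then true else ready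
    let including := if ready && first.isSome && PySem.Str.isIn (first.getD "") line then true else including
    if including then
      match numblanks with
      | some nb =>
        if PySem.Str.strip line = "" then
          if nb - 1 = 0 then []
          else
            line ::
              (match numlines with
               | some nl => if nl - 1 = 0 then [] else selLoopA first after rest ready including (some (nl - 1)) (some (nb - 1))
               | none => selLoopA first after rest ready including numlines (some (nb - 1)))
        else
          line ::
            (match numlines with
             | some nl => if nl - 1 = 0 then [] else selLoopA first after rest ready including (some (nl - 1)) numblanks
             | none => selLoopA first after rest ready including numlines numblanks)
      | none =>
        line ::
          (match numlines with
           | some nl => if nl - 1 = 0 then [] else selLoopA first after rest ready including (some (nl - 1)) numblanks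
           | none => selLoopA first after rest ready including numlines numblanks)
    else selLoopA first after rest ready including numlines numblanks

def selected_lines (lines : List String) (first : Option String) (after : Option String) (numlines : Option Int) (numblanks : Option Int) : List String :=
  selLoopA first after lines after.isNone false numlines numblanks

-- ===== PORT B =====
-- B's `while i < len(seq) and needle not in seq[i]: i += 1` followed by `seq[i:]`.
def skipTo (needle : String) : List String → List String
  | [] => []
  | l :: rest => if PySem.Str.isIn needle l then l :: rest else skipTo needle rest

-- B's counter scan: how many leading lines of seq are emitted (the cut index).
def cutIndex : List String → Option Int → Option Int → Nat
  | [], _, _ => 0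
  | line :: rest, nl, nb =>
    let blank := PySem.Str.strip line = ""
    let nb' := if blank then nb.map (· - 1) else nb
    if blank ∧ nb' = some 0 then 0
    else
      match nl with
      | some n => if n - 1 = 0 then 1 else cutIndex rest (some (n - 1)) nb' + 1
      | none => cutIndex rest none nb' + 1

def selected_lines_alt (lines : List String) (first : Option String) (after : Option String) (numlines : Option Int) (numblanks : Option Int) : List String :=
  match first with
  | none => []
  | some f =>
    let seq := skipTo f (match after with | some a => skipTo a lines | none => lines)
    seq.take (cutIndex seq numlines numblanks)

-- ===== PRECONDITION & SPEC =====
def Spec_selected_lines (lines : List String) (first : Option String) (after : Option String) (numlines : Option Int) (numblanks : Option Int) (out : List String) : Prop := out = selected_lines_alt lines first after numlines numblanks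
instance (lines : List String) (first : Option String) (after : Option String) (numlines : Option Int) (numblanks : Option Int) (out : List String) : Decidable (Spec_selected_lines lines first after numlines numblanks out) := by unfold Spec_selected_lines; infer_instance

-- ===== CLAIM (what is proved, stated in full; the proofs are below) =====
def Claim_equal_selected_lines : Prop := ∀ (lines : List String) (first : Option String) (after : Option String) (numlines : Option Int) (numblanks : Option Int), Dom_selected_lines lines first after numlines numblanks → Spec_selected_lines lines first after numlines numblanks (selected_lines lines first after numlines numblanks)

-- ===== LEMMAS AND PROOFS =====

-- first = None: including never becomes true, nothing is yielded.
theorem selLoopA_none (after : Option String) :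
    ∀ (lines : List String) (r : Bool) (nl nb : Option Int),
      selLoopA none after lines r false nl nb = [] := by
  intro lines
  induction lines with
  | nil => intro r nl nb; rfl
  | cons line rest ih =>
    intro r nl nb
    simp [selLoopA, ih]

-- once including, A's body emits exactly the cut-index prefix
theorem selLoopA_including (f : String) (after : Option String) :
    ∀ (lines : List String) (nl nb : Option Int),
      selLoopA (some f) after lines true true nl nb = lines.take (cutIndex lines nl nb) := by
  intro lines
  induction lines with
  | nil => intro nl nb; rfl
  | cons line rest ih =>
    intro nl nb
    by_cases hblank : PySem.Str.strip line = ""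
    · cases nb with
      | none =>
        cases nl with
        | none => simp [selLoopA, cutIndex, hblank, ih]
        | some n =>
          by_cases hn0 : n - 1 = 0 <;>
            simp [selLoopA, cutIndex, hblank, hn0, ih]
      | some b =>
        by_cases hb0 : b - 1 = 0
        · simp [selLoopA, cutIndex, hblank, hb0]
        · cases nl with
          | none => simp [selLoopA, cutIndex, hblank, hb0, ih]
          | some n =>
            by_cases hn0 : n - 1 = 0 <;>
              simp [selLoopA, cutIndex, hblank, hb0, hn0, ih]
    · cases nl with
      | none => cases nb <;> simp [selLoopA, cutIndex, hblank, ih]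
      | some n =>
        by_cases hn0 : n - 1 = 0 <;> cases nb <;>
          simp [selLoopA, cutIndex, hblank, hn0, ih]

-- ready but not yet including: A scans for `first`, exactly B's second skip phase
theorem selLoopA_ready (f : String) (after : Option String) :
    ∀ (lines : List String) (nl nb : Option Int),
      selLoopA (some f) after lines true false nl nb
        = (skipTo f lines).take (cutIndex (skipTo f lines) nl nb) := by
  intro lines
  induction lines with
  | nil => intro nl nb; rfl
  | cons line rest ih =>
    intro nl nb
    by_cases hf : PySem.Str.isIn f line = true
    · rw [show skipTo f (line :: rest) = line :: rest by
        simp only [skipTo, hf, if_true]]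
      rw [← selLoopA_including f after (line :: rest) nl nb]
      simp only [selLoopA, Bool.not_true, Bool.false_and, Bool.false_eq_true, if_false,
        Option.isSome_some, Option.getD_some, Bool.true_and, hf, if_true]
    · rw [show skipTo f (line :: rest) = skipTo f rest by
        simp only [skipTo, hf, Bool.false_eq_true, if_false]]
      rw [← ih nl nb]
      simp only [selLoopA, Bool.not_true, Bool.false_and, Bool.false_eq_true, if_false,
        Option.isSome_some, Option.getD_some, Bool.true_and, hf]

-- not yet ready: A scans for `after`, exactly B's first skip phase
theorem selLoopA_waiting (f a : String) :
    ∀ (lines : List String) (nl nb : Option Int),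
      selLoopA (some f) (some a) lines false false nl nb
        = (skipTo f (skipTo a lines)).take (cutIndex (skipTo f (skipTo a lines)) nl nb) := by
  intro lines
  induction lines with
  | nil => intro nl nb; rfl
  | cons line rest ih =>
    intro nl nb
    by_cases ha : PySem.Str.isIn a line = true
    · rw [show skipTo a (line :: rest) = line :: rest by
        simp only [skipTo, ha, if_true]]
      rw [← selLoopA_ready f (some a)]
      simp only [selLoopA, Bool.not_false, Bool.true_and, Option.getD_some, ha, if_true,
        Bool.not_true, Bool.false_and, Bool.false_eq_true, if_false]
    · rw [show skipTo a (line :: rest) = skipTo a rest by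
        simp only [skipTo, ha, Bool.false_eq_true, if_false]]
      rw [← ih nl nb]
      simp only [selLoopA, Bool.not_false, Bool.true_and, Option.getD_some, ha,
        Bool.false_eq_true, if_false, Bool.false_and]

-- ===== VERDICT (by name: the statement is the Claim_ definition above) =====
theorem selected_lines_spec : Claim_equal_selected_lines := by
  intro lines first after nl nb _
  unfold Spec_selected_lines selected_lines selected_lines_alt
  cases first with
  | none => simpa using selLoopA_none after lines after.isNone nl nb
  | some f =>
    cases after with
    | none => simpa using selLoopA_ready f none lines nl nb
    | some a => simpa using selLoopA_waiting f a lines nl nb
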